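-- pv_equiv track=rewrite | github.com/MaxRStevens-1/adventofcode23 | day1/day1.py | find_next_num
-- ===== SOURCE A (Python) =====
-- num_dic = {
--     "one": 1,
--     "two": 2,
--     "three": 3,
--     "four": 4,
--     "five":5,
--     "six":6,
--     "seven":7,
--     "eight":8,
--     "nine": 9
-- }
--
-- num_strings = ["one", "two", "three", "four", "five", "six", "seven", "eight", "nine"]
--
-- def find_next_num(line, index):
--     for i in range(index, len(line)):
--         char = line[i]
--         if (char in ["o", "t", "f", "s", "e", "n"]):
--             for num_str in num_strings:
--                 if (line[i:i+len(num_str)] == num_str):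
--                     return num_dic[num_str]
--         elif char.isdigit():
--             return int(char)
-- ===== SOURCE B (Python) =====
-- num_dic = {
--     "one": 1,
--     "two": 2,
--     "three": 3,
--     "four": 4,
--     "five": 5,
--     "six": 6,
--     "seven": 7,
--     "eight": 8,
--     "nine": 9,
-- }
--
-- # every token (digit characters and spelled-out words) with its value
-- tokens = [(str(d), d) for d in range(10)] + list(num_dic.items())
--
-- def find_next_num(line, index):
--     best_pos = -1
--     best_val = None
--     for tok, val in tokens:
--         p = line.find(tok, index)
--         if p != -1 and (best_pos == -1 or p < best_pos):
--             best_pos = p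
--             best_val = val
--     return best_val
-- ===== Notes on version B (the rewrite author's own statement) =====
-- stated objective: faster
-- what changed: A scans the line character by character in interpreted Python, testing a letter set and slicing against each of the nine words at every position; B instead issues one str.find per token (the 10 digit characters and the 9 spelled-out words) and returns the value of the leftmost hit, which is well-defined because no token is a prefix of another.
-- outside the precondition, e.g. on find_next_num('3two', -3): A returns 3, B returns 2; on find_next_num('1a', -1): A returns 1, B returns None
import Mathlib
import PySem

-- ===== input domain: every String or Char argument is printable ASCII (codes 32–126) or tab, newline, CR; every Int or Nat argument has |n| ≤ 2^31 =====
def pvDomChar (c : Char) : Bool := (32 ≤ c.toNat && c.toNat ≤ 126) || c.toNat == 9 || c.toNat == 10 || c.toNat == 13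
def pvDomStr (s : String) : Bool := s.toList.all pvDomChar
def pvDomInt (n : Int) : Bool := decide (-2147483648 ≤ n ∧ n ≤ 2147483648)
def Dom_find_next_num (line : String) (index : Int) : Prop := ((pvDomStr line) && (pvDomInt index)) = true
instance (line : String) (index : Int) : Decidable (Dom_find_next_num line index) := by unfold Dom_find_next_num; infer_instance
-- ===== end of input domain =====

-- B replaces A's per-character scan (letter filter + inner word loop) by one str.find per token
-- (the 10 digit characters and the 9 spelled-out words), keeping the leftmost hit; equivalence is
-- proved for nonnegative start indices (the helper's natural domain).

-- ===== PORT A =====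
def pvNumDic : PySem.Dict String Int :=
  PySem.Dict.ofList [("one",1),("two",2),("three",3),("four",4),("five",5),("six",6),("seven",7),("eight",8),("nine",9)]

def pvNumStrings : List String := ["one","two","three","four","five","six","seven","eight","nine"]

-- inner loop: for num_str in num_strings: if line[i:i+len(num_str)] == num_str: return num_dic[num_str]
def pvInnerA (cs : List Char) (i : Int) : List String → Option Int
  | [] => none
  | w :: ws =>
    if PySem.List.slice cs (some i) (some (i + PySem.Str.len w)) = w.toList then
      PySem.Dict.get? pvNumDic w            -- num_dic[num_str] (key always present)
    else pvInnerA cs i ws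

-- for i in range(index, len(line)): …
def pvLoopA (cs : List Char) : List Int → Option Int
  | [] => none                              -- loop ends without return: None
  | i :: rest =>
    match PySem.List.pyGet? cs i with
    | none => none                          -- IndexError (excluded by Pre_)
    | some c =>
      if c ∈ ['o','t','f','s','e','n'] then
        match pvInnerA cs i pvNumStrings with
        | some v => some v
        | none => pvLoopA cs rest
      else if PySem.Chars.isdigit c then
        PySem.Int.ofChars? [c]              -- int(char); char is a digit, so always some
      else pvLoopA cs rest

def find_next_num (line : String) (index : Int) : Option Int :=
  pvLoopA line.toList (PySem.List.pyRange index (PySem.Str.len line) 1)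

-- ===== PORT B =====
def pvTokens : List (String × Int) :=
  [("0",0),("1",1),("2",2),("3",3),("4",4),("5",5),("6",6),("7",7),("8",8),("9",9),
   ("one",1),("two",2),("three",3),("four",4),("five",5),("six",6),("seven",7),("eight",8),("nine",9)]

def find_next_num_alt (line : String) (index : Int) : Option Int :=
  (pvTokens.foldl
    (fun (best : Int × Option Int) tv =>
      let p := PySem.Str.findFrom line tv.1 index
      if p ≠ -1 ∧ (best.1 = -1 ∨ p < best.1) then (p, some tv.2) else best)
    (-1, none)).2

-- ===== PRECONDITION & SPEC =====
-- Pre_ restricts to nonnegative start indices, the helper's natural domain (its day-1 callers pass 0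
-- or a previous match position + 1): for -len(line) <= index < 0 Python's negative indexing makes A
-- wrap around the end of the string, and for index < -len(line) A raises IndexError.
def Pre_find_next_num (line : String) (index : Int) : Prop := 0 ≤ index
instance (line : String) (index : Int) : Decidable (Pre_find_next_num line index) := by unfold Pre_find_next_num; infer_instance

def pvWitness_find_next_num : String × Int := ("a1two", 0)

def Spec_find_next_num (line : String) (index : Int) (out : Option Int) : Prop := out = find_next_num_alt line index
instance (line : String) (index : Int) (out : Option Int) : Decidable (Spec_find_next_num line index out) := by unfold Spec_find_next_num; infer_instance

-- ===== CLAIM (what is proved, stated in full; the proofs are below) =====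
def Claim_equal_find_next_num : Prop := ∀ (line : String) (index : Int), Dom_find_next_num line index → Pre_find_next_num line index → Spec_find_next_num line index (find_next_num line index)

-- ===== LEMMAS AND PROOFS =====

-- value of the unique token (digit character or spelled-out word) matching at position p, if any
def pvTokAtGo (cs : List Char) (p : Nat) : List (String × Int) → Option Int
  | [] => none
  | tv :: rest => if tv.1.toList <+: cs.drop p then some tv.2 else pvTokAtGo cs p rest

def pvTokAt (cs : List Char) (p : Nat) : Option Int := pvTokAtGo cs p pvTokens

-- first token value at a position ≥ p (fuel-bounded scan)
def pvFirstTok (cs : List Char) : Nat → Nat → Option Int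
  | _, 0 => none
  | p, fuel+1 =>
    match pvTokAt cs p with
    | some v => some v
    | none => pvFirstTok cs (p+1) fuel

lemma pv_tokens_nonempty : ∀ tv ∈ pvTokens, tv.1.toList ≠ [] := by decide

lemma pv_tokens_prefix_free : ∀ tv1 ∈ pvTokens, ∀ tv2 ∈ pvTokens, tv1.1.toList <+: tv2.1.toList → tv1 = tv2 := by decide

lemma pv_unique_match {cs : List Char} {tv1 tv2 : String × Int}
    (h1 : tv1 ∈ pvTokens) (h2 : tv2 ∈ pvTokens)
    (m1 : tv1.1.toList <+: cs) (m2 : tv2.1.toList <+: cs) : tv1 = tv2 := by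
  rcases List.prefix_or_prefix_of_prefix m1 m2 with h | h
  · exact pv_tokens_prefix_free tv1 h1 tv2 h2 h
  · exact (pv_tokens_prefix_free tv2 h2 tv1 h1 h).symm

lemma pvTokAtGo_eq_none_iff {cs : List Char} {p : Nat} {L : List (String × Int)} :
    pvTokAtGo cs p L = none ↔ ∀ tv ∈ L, ¬ tv.1.toList <+: cs.drop p := by
  induction L with
  | nil => simp [pvTokAtGo]
  | cons tv rest ih => by_cases h : tv.1.toList <+: cs.drop p <;> simp [pvTokAtGo, h, ih]

lemma pvTokAt_eq_none_iff {cs : List Char} {p : Nat} :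
    pvTokAt cs p = none ↔ ∀ tv ∈ pvTokens, ¬ tv.1.toList <+: cs.drop p := by
  unfold pvTokAt
  exact pvTokAtGo_eq_none_iff

lemma pvTokAtGo_eq_some_of {cs : List Char} {p : Nat} {tv : String × Int} :
    ∀ {L : List (String × Int)}, tv ∈ L → tv.1.toList <+: cs.drop p →
      (∀ tv' ∈ L, tv'.1.toList <+: cs.drop p → tv' = tv) → pvTokAtGo cs p L = some tv.2 := by
  intro L
  induction L with
  | nil => intro h; cases h
  | cons a rest ih =>
    intro hmem m huniq
    by_cases ha : a.1.toList <+: cs.drop p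
    · have := huniq a (by simp) ha
      subst this
      simp [pvTokAtGo, ha]
    · have hm : tv ∈ rest := by
        rcases List.mem_cons.mp hmem with rfl | h
        · exact absurd m ha
        · exact h
      simp only [pvTokAtGo, if_neg ha]
      exact ih hm m (fun tv' h' m' => huniq tv' (List.mem_cons_of_mem _ h') m')

lemma pvTokAt_eq_some_of {cs : List Char} {p : Nat} {tv : String × Int}
    (h : tv ∈ pvTokens) (m : tv.1.toList <+: cs.drop p) : pvTokAt cs p = some tv.2 :=
  pvTokAtGo_eq_some_of h m (fun _ h' m' => pv_unique_match h' h m' m)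

lemma pvTokAt_ge_len {cs : List Char} {p : Nat} (h : cs.length ≤ p) : pvTokAt cs p = none := by
  rw [pvTokAt_eq_none_iff]
  intro tv htv m
  rw [List.drop_eq_nil_of_le h] at m
  exact pv_tokens_nonempty tv htv (List.prefix_nil.mp m)

lemma pvFirstTok_none {cs : List Char} :
    ∀ (fuel p : Nat), (∀ q, p ≤ q → pvTokAt cs q = none) → pvFirstTok cs p fuel = none := by
  intro fuel
  induction fuel with
  | zero => intro p _; rfl
  | succ n ih =>
    intro p h
    simp only [pvFirstTok, h p le_rfl]
    exact ih (p+1) (fun q hq => h q (by omega))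

lemma pvFirstTok_some {cs : List Char} {v : Int} :
    ∀ (fuel p q : Nat), p ≤ q → q < p + fuel → (∀ r, p ≤ r → r < q → pvTokAt cs r = none) →
      pvTokAt cs q = some v → pvFirstTok cs p fuel = some v := by
  intro fuel
  induction fuel with
  | zero => intro p q _ h; omega
  | succ n ih =>
    intro p q hpq hlt hmid hq
    rcases Nat.eq_or_lt_of_le hpq with rfl | hlt'
    · simp [pvFirstTok, hq]
    · simp only [pvFirstTok, hmid p le_rfl hlt']
      exact ih (p+1) q (by omega) (by omega) (fun r h1 h2 => hmid r (by omega) h2) hq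

lemma pv_digit_cases {c : Char} (h : PySem.Chars.isdigit c = true) :
    c ∈ ['0','1','2','3','4','5','6','7','8','9'] := by
  simp [PySem.Chars.isdigit, Char.le_def] at h
  obtain ⟨h1, h2⟩ := h
  have hv1 : 48 ≤ c.toNat := UInt32.le_iff_toNat_le.mp h1
  have hv2 : c.toNat ≤ 57 := UInt32.le_iff_toNat_le.mp h2
  have hcn : Char.ofNat c.toNat = c := Char.ofNat_toNat c
  interval_cases hx : c.toNat <;> rw [← hcn] <;> decide

lemma pv_slice_eq_iff (cs : List Char) (p : Nat) (w : String) :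
    (PySem.List.slice cs (some (p:Int)) (some ((p:Int) + PySem.Str.len w)) = w.toList) ↔
      w.toList <+: cs.drop p := by
  rw [PySem.Str.len_eq, PySem.List.slice_natCast_add, List.prefix_iff_eq_take, eq_comm]

lemma pv_la_letter {cs : List Char} {p : Nat} {c : Char} (hc : cs.drop p = c :: cs.drop (p+1))
    (hl : c ∈ ['o','t','f','s','e','n']) : pvInnerA cs (p:Int) pvNumStrings = pvTokAt cs p := by
  have d1 : PySem.Dict.get? pvNumDic "one" = some 1 := by decide
  have d2 : PySem.Dict.get? pvNumDic "two" = some 2 := by decide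
  have d3 : PySem.Dict.get? pvNumDic "three" = some 3 := by decide
  have d4 : PySem.Dict.get? pvNumDic "four" = some 4 := by decide
  have d5 : PySem.Dict.get? pvNumDic "five" = some 5 := by decide
  have d6 : PySem.Dict.get? pvNumDic "six" = some 6 := by decide
  have d7 : PySem.Dict.get? pvNumDic "seven" = some 7 := by decide
  have d8 : PySem.Dict.get? pvNumDic "eight" = some 8 := by decide
  have d9 : PySem.Dict.get? pvNumDic "nine" = some 9 := by decide
  fin_cases hl <;>
  · simp only [pvInnerA, pvNumStrings]
    simp only [pv_slice_eq_iff]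
    simp [pvTokAt, pvTokAtGo, pvTokens, hc, List.cons_prefix_cons,
      d1, d2, d3, d4, d5, d6, d7, d8, d9]

lemma pv_la_digit {cs : List Char} {p : Nat} {c : Char} (hc : cs.drop p = c :: cs.drop (p+1))
    (hd : PySem.Chars.isdigit c = true) :
    pvTokAt cs p = PySem.Int.ofChars? [c] ∧ (PySem.Int.ofChars? [c]).isSome := by
  have hmem := pv_digit_cases hd
  fin_cases hmem <;>
  · refine ⟨?_, by decide⟩
    simp [pvTokAt, pvTokAtGo, pvTokens, hc, List.cons_prefix_cons]
    decide

lemma pv_la_none {cs : List Char} {p : Nat} {c : Char} (hc : cs.drop p = c :: cs.drop (p+1))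
    (hl : c ∉ ['o','t','f','s','e','n']) (hd : PySem.Chars.isdigit c = false) :
    pvTokAt cs p = none := by
  simp at hl
  obtain ⟨n1,n2,n3,n4,n5,n6⟩ := hl
  have hds : ∀ d : Char, PySem.Chars.isdigit d = true → c ≠ d := fun d h1 h2 => by
    rw [h2] at hd; rw [hd] at h1; cases h1
  have g0 : ¬('0' = c) := fun h => hds '0' (by decide) h.symm
  have g1 : ¬('1' = c) := fun h => hds '1' (by decide) h.symm
  have g2 : ¬('2' = c) := fun h => hds '2' (by decide) h.symm
  have g3 : ¬('3' = c) := fun h => hds '3' (by decide) h.symm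
  have g4 : ¬('4' = c) := fun h => hds '4' (by decide) h.symm
  have g5 : ¬('5' = c) := fun h => hds '5' (by decide) h.symm
  have g6 : ¬('6' = c) := fun h => hds '6' (by decide) h.symm
  have g7 : ¬('7' = c) := fun h => hds '7' (by decide) h.symm
  have g8 : ¬('8' = c) := fun h => hds '8' (by decide) h.symm
  have g9 : ¬('9' = c) := fun h => hds '9' (by decide) h.symm
  have m1 : ¬('o' = c) := fun h => n1 h.symm
  have m2 : ¬('t' = c) := fun h => n2 h.symm
  have m3 : ¬('f' = c) := fun h => n3 h.symm
  have m4 : ¬('s' = c) := fun h => n4 h.symm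
  have m5 : ¬('e' = c) := fun h => n5 h.symm
  have m6 : ¬('n' = c) := fun h => n6 h.symm
  simp [pvTokAt, pvTokAtGo, pvTokens, hc, List.cons_prefix_cons,
    g0,g1,g2,g3,g4,g5,g6,g7,g8,g9,m1,m2,m3,m4,m5,m6]

lemma pv_loopA_eq (cs : List Char) :
    ∀ (d p : Nat), cs.length ≤ p + d →
      pvLoopA cs (PySem.List.pyRange (p:Int) (cs.length:Int) 1) = pvFirstTok cs p d := by
  intro d
  induction d with
  | zero =>
    intro p hp
    rw [PySem.List.pyRange_one_eq_nil (by exact_mod_cast hp)]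
    rfl
  | succ d ih =>
    intro p hp
    by_cases hlt : p < cs.length
    · rw [PySem.List.pyRange_one_cons (by exact_mod_cast hlt)]
      have hc : cs.drop p = cs[p] :: cs.drop (p+1) := List.drop_eq_getElem_cons hlt
      have hget : PySem.List.pyGet? cs (p:Int) = some cs[p] := by
        rw [PySem.List.pyGet?_natCast]
        exact List.getElem?_eq_getElem hlt
      have hrange : ((p:Int) + 1) = ((p+1 : Nat) : Int) := by push_cast; ring
      simp only [pvLoopA, hget]
      by_cases hmem : cs[p] ∈ ['o','t','f','s','e','n']
      · rw [if_pos hmem, pv_la_letter hc hmem]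
        cases htok : pvTokAt cs p with
        | some v => simp [pvFirstTok, htok]
        | none =>
          simp only [pvFirstTok, htok]
          rw [hrange]
          exact ih (p+1) (by omega)
      · rw [if_neg hmem]
        by_cases hdig : PySem.Chars.isdigit cs[p] = true
        · obtain ⟨h1, h2⟩ := pv_la_digit hc hdig
          obtain ⟨v, hv⟩ := Option.isSome_iff_exists.mp h2
          rw [hv] at h1
          simp [hdig, hv, pvFirstTok, h1]
        · have h0 := pv_la_none hc hmem (Bool.eq_false_iff.mpr hdig)
          simp only [Bool.not_eq_true] at hdig
          simp only [hdig, pvFirstTok, h0]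
          rw [hrange]
          exact ih (p+1) (by omega)
    · rw [PySem.List.pyRange_one_eq_nil (by exact_mod_cast (by omega : cs.length ≤ p))]
      rw [pvFirstTok_none (d+1) p (fun q hq => pvTokAt_ge_len (by omega))]
      rfl

-- ===== B side =====

lemma pv_findFrom_big {cs sub : List Char} {i : Int} (h0 : 0 ≤ i) (h : (cs.length:Int) < i) :
    PySem.Chars.findFrom cs sub i none = -1 := by
  simp only [PySem.Chars.findFrom]
  rw [if_neg (not_lt.mpr h0), if_pos h]

lemma pv_foldB_allneg (line : String) (index : Int)
    (h : ∀ tv ∈ pvTokens, PySem.Str.findFrom line tv.1 index = -1) :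
    find_next_num_alt line index = none := by
  unfold find_next_num_alt
  have : ∀ (L : List (String × Int)), (∀ tv ∈ L, PySem.Str.findFrom line tv.1 index = -1) →
      ∀ b : Int × Option Int,
      (L.foldl
        (fun (best : Int × Option Int) tv =>
          let p := PySem.Str.findFrom line tv.1 index
          if p ≠ -1 ∧ (best.1 = -1 ∨ p < best.1) then (p, some tv.2) else best)
        b) = b := by
    intro L
    induction L with
    | nil => intro _ b; rfl
    | cons tv rest ih =>
      intro hL b
      simp only [List.foldl_cons]
      have hz : PySem.Chars.findFrom line.toList tv.1.toList index = -1 := by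
        rw [← PySem.Str.findFrom_eq]; exact hL tv (by simp)
      rw [if_neg (by simp [hz])]
      exact ih (fun tv' h' => hL tv' (List.mem_cons_of_mem _ h')) b
  rw [this pvTokens h (-1, none)]

lemma pv_foldB_inv (line : String) (index : Int)
    (hF : ∀ tv : String × Int, PySem.Str.findFrom line tv.1 index = -1 ∨ 0 ≤ PySem.Str.findFrom line tv.1 index) :
    ∀ (L : List (String × Int)),
      (L.foldl
        (fun (best : Int × Option Int) tv =>
          let p := PySem.Str.findFrom line tv.1 index
          if p ≠ -1 ∧ (best.1 = -1 ∨ p < best.1) then (p, some tv.2) else best)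
        (-1, none) = ((-1 : Int), (none : Option Int)) ∧ ∀ tv ∈ L, PySem.Str.findFrom line tv.1 index = -1) ∨
      (∃ tv ∈ L, PySem.Str.findFrom line tv.1 index ≠ -1 ∧
        L.foldl
          (fun (best : Int × Option Int) tv =>
            let p := PySem.Str.findFrom line tv.1 index
            if p ≠ -1 ∧ (best.1 = -1 ∨ p < best.1) then (p, some tv.2) else best)
          (-1, none) = (PySem.Str.findFrom line tv.1 index, some tv.2) ∧
        ∀ tv' ∈ L, PySem.Str.findFrom line tv'.1 index = -1 ∨ PySem.Str.findFrom line tv.1 index ≤ PySem.Str.findFrom line tv'.1 index) := by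
  intro L
  simp only [PySem.Str.findFrom_eq] at hF ⊢
  induction L using List.reverseRecOn with
  | nil => left; exact ⟨rfl, by simp⟩
  | append_singleton L tv ih =>
    rw [List.foldl_append]
    rcases ih with ⟨hr, hall⟩ | ⟨tv0, hmem, hne, hr, hmin⟩
    · rw [hr]
      by_cases hnew : PySem.Chars.findFrom line.toList tv.1.toList index = -1
      · left
        refine ⟨by simp [hnew], ?_⟩
        intro tv' h'
        rcases List.mem_append.mp h' with h' | h'
        · exact hall tv' h'
        · rw [List.mem_singleton.mp h']; exact hnew
      · right
        refine ⟨tv, by simp, hnew, by simp [hnew], ?_⟩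
        intro tv' h'
        rcases List.mem_append.mp h' with h' | h'
        · exact Or.inl (hall tv' h')
        · rw [List.mem_singleton.mp h']; exact Or.inr le_rfl
    · rw [hr]
      have h0 := (hF tv0).resolve_left hne
      by_cases hnew : PySem.Chars.findFrom line.toList tv.1.toList index ≠ -1 ∧
          (PySem.Chars.findFrom line.toList tv0.1.toList index = -1 ∨ PySem.Chars.findFrom line.toList tv.1.toList index < PySem.Chars.findFrom line.toList tv0.1.toList index)
      · right
        have hlt : PySem.Chars.findFrom line.toList tv.1.toList index < PySem.Chars.findFrom line.toList tv0.1.toList index := by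
          rcases hnew.2 with h | h
          · omega
          · exact h
        refine ⟨tv, by simp, hnew.1, by simp [hnew], ?_⟩
        intro tv' h'
        rcases List.mem_append.mp h' with h' | h'
        · rcases hmin tv' h' with h | h
          · exact Or.inl h
          · exact Or.inr (by omega)
        · rw [List.mem_singleton.mp h']; exact Or.inr le_rfl
      · right
        refine ⟨tv0, List.mem_append_left _ hmem, hne, by simp [if_neg hnew], ?_⟩
        intro tv' h'
        rcases List.mem_append.mp h' with h' | h'
        · exact hmin tv' h'
        · rw [List.mem_singleton.mp h']
          by_cases hv : PySem.Chars.findFrom line.toList tv.1.toList index = -1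
          · exact Or.inl hv
          · right
            rcases hF tv with h | h
            · exact absurd h hv
            · by_contra hcon
              exact hnew ⟨hv, Or.inr (by omega)⟩

lemma pv_infix_of_prefix_drop {cs t : List Char} {k q : Nat} (hkq : k ≤ q)
    (m : t <+: cs.drop q) : t <:+: cs.drop k := by
  have : cs.drop q = (cs.drop k).drop (q - k) := by
    rw [List.drop_drop]
    congr 1
    omega
  rw [this] at m
  exact m.isInfix.trans (List.drop_suffix _ _).isInfix

lemma pv_altB_eq (line : String) (index : Int) (h0 : 0 ≤ index)
    (hk : index.toNat ≤ line.toList.length) :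
    find_next_num_alt line index =
      pvFirstTok line.toList index.toNat (line.toList.length - index.toNat) := by
  set cs := line.toList with hcs
  set k := index.toNat with hkdef
  have hik : index = (k : Int) := (Int.toNat_of_nonneg h0).symm
  have hFF : ∀ tv : String × Int,
      PySem.Str.findFrom line tv.1 index = PySem.Chars.findFrom cs tv.1.toList (k:Int) none := by
    intro tv
    rw [PySem.Str.findFrom_eq, hik]
  have hF : ∀ tv : String × Int, PySem.Str.findFrom line tv.1 index = -1 ∨ 0 ≤ PySem.Str.findFrom line tv.1 index := by
    intro tv
    rw [hFF tv, PySem.Chars.findFrom_natCast cs tv.1.toList k hk]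
    split_ifs with h
    · exact Or.inl rfl
    · right
      have := PySem.Chars.neg_one_le_find (List.drop k cs) tv.1.toList
      omega
  rcases pv_foldB_inv line index hF pvTokens with ⟨hr, hall⟩ | ⟨tv, hmem, hne, hr, hmin⟩
  · unfold find_next_num_alt
    rw [hr]
    symm
    apply pvFirstTok_none
    intro q hq
    rw [pvTokAt_eq_none_iff]
    intro tv htv m
    have hinf : tv.1.toList <:+: cs.drop k := pv_infix_of_prefix_drop hq m
    have := (PySem.Chars.findFrom_natCast_eq_neg_one_iff cs tv.1.toList k hk).mp
      (by rw [← hFF tv]; exact hall tv htv)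
    exact this hinf
  · have hne' : PySem.Chars.findFrom cs tv.1.toList (k:Int) none ≠ -1 := by rw [← hFF tv]; exact hne
    obtain ⟨hge, hpref, hminpos⟩ := PySem.Chars.findFrom_natCast_spec cs tv.1.toList k hk hne'
    set q := (PySem.Chars.findFrom cs tv.1.toList (k:Int) none).toNat with hqdef
    have hq0 : 0 ≤ PySem.Chars.findFrom cs tv.1.toList (k:Int) none := by
      rw [← hFF tv]; exact ((hF tv).resolve_left hne)
    have hkq : k ≤ q := by omega
    have hqn : q < cs.length := by
      by_contra hcon
      rw [List.drop_eq_nil_of_le (by omega)] at hpref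
      exact pv_tokens_nonempty tv hmem (List.prefix_nil.mp hpref)
    unfold find_next_num_alt
    rw [hr]
    symm
    apply pvFirstTok_some (cs.length - k) k q hkq (by omega) ?mid ?hit
    case hit => exact pvTokAt_eq_some_of hmem hpref
    case mid =>
      intro r hr1 hr2
      rw [pvTokAt_eq_none_iff]
      intro tv' htv' m'
      have hinf' : tv'.1.toList <:+: cs.drop k := pv_infix_of_prefix_drop hr1 m'
      have hne2 : PySem.Chars.findFrom cs tv'.1.toList (k:Int) none ≠ -1 := by
        intro hcon
        exact (PySem.Chars.findFrom_natCast_eq_neg_one_iff cs tv'.1.toList k hk).mp hcon hinf'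
      obtain ⟨hge2, _, hminpos2⟩ := PySem.Chars.findFrom_natCast_spec cs tv'.1.toList k hk hne2
      have hle : PySem.Chars.findFrom cs tv.1.toList (k:Int) none ≤ PySem.Chars.findFrom cs tv'.1.toList (k:Int) none := by
        rcases hmin tv' htv' with h | h
        · rw [hFF tv'] at h; exact absurd h hne2
        · rw [hFF tv, hFF tv'] at h; exact h
      have hr3 : (PySem.Chars.findFrom cs tv'.1.toList (k:Int) none).toNat ≤ r := by
        by_contra hcon
        exact hminpos2 r hr1 (by omega) m'
      omega

-- ===== VERDICT (by name: the statement is the Claim_ definition above) =====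
theorem find_next_num_spec : Claim_equal_find_next_num := by
  intro line index _ hpre
  unfold Pre_find_next_num at hpre
  unfold Spec_find_next_num
  set cs := line.toList with hcs
  set n := cs.length with hn
  set k := index.toNat with hk
  have hik : index = (k : Int) := (Int.toNat_of_nonneg hpre).symm
  have hA : find_next_num line index = pvFirstTok cs k (n - k) := by
    unfold find_next_num
    rw [PySem.Str.len_eq, hik]
    exact pv_loopA_eq cs (n - k) k (by omega)
  by_cases hkn : k ≤ n
  · rw [hA, pv_altB_eq line index hpre hkn]
  · rw [hA]
    have hnone : ∀ tv ∈ pvTokens, PySem.Str.findFrom line tv.1 index = -1 := by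
      intro tv _
      rw [PySem.Str.findFrom_eq]
      exact pv_findFrom_big hpre (by rw [← hcs]; omega)
    rw [pv_foldB_allneg line index hnone]
    have : n - k = 0 := by omega
    rw [this]
    rfl
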